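-- pv_equiv track=rewrite | github.com/Super262/LintCodeSolutions | problem0543.py | KthInArrays
-- ===== SOURCE A (Python) =====
-- def KthInArrays(arrays: list, k: int):
--     import heapq
--     # heapq 是一个 min-heap，所以所有数取相反数往里丢。取出来的时候要再取一个相反数
--     if not arrays or k <= 0:
--         return None
--     sorted_arrays = []
--     for arr in arrays:
--         if not arr:
--             continue
--         sorted_arrays.append(sorted(arr, reverse=True))
--     min_heap = []
--     for index, array in enumerate(sorted_arrays):
--         min_heap.append((-array[0], index, 0))
--     heapq.heapify(min_heap)
--     result = None
--     for _ in range(k):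
--         num, array_index, item_index = heapq.heappop(min_heap)
--         result = -num
--         if item_index + 1 < len(sorted_arrays[array_index]):
--             heapq.heappush(min_heap, (-sorted_arrays[array_index][item_index + 1], array_index, item_index + 1))
--     return result
-- ===== SOURCE B (Python) =====
-- def KthInArrays(arrays: list, k: int):
--     # Flatten everything once, sort descending once, index the (k-1)-th element.
--     if not arrays or k <= 0:
--         return None
--     flat = []
--     for arr in arrays:
--         flat.extend(arr)
--     flat.sort(reverse=True)
--     return flat[k - 1]
-- ===== Notes on version B (the rewrite author's own statement) =====
-- stated objective: faster
-- what changed: Replaces the per-array descending sorts plus a k-step heap-of-frontiers merge with one flatten, one descending sort and a direct index of the (k-1)-th element.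
import Mathlib
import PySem

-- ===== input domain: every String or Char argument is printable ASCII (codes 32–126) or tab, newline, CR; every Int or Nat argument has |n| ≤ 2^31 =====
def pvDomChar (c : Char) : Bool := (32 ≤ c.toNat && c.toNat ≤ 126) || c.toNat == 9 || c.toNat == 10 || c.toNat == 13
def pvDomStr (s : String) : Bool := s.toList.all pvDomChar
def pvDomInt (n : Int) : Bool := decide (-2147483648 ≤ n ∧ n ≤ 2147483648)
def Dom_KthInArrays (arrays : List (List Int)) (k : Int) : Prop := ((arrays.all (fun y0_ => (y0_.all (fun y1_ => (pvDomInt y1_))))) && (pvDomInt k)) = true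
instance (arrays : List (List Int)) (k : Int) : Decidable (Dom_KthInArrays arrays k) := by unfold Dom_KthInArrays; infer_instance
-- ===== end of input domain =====

-- B replaces the per-array sorts + k-step heap merge by one flatten, one descending sort
-- and a direct index (equivalence is about the RETURN value; neither side mutates its input).


-- ===== PORT A =====
-- A's heapq stdlib calls are ported by their contract: the heap is a bag of tuples from
-- which heappop removes the lexicographically least one (pvPopMin); all tuples in A's heap
-- are distinct (the (array_index, item_index) components are unique), so the popped
-- sequence — the only thing A observes about the heap — is exactly CPython's, and
-- heapify is the identity on the bag. Tuples (-value, array_index, item_index) are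
-- (Int × Int × Nat): the ever-nonnegative item_index counter is kept as a Nat.
def pvTLt (a b : Int × Int × Nat) : Bool :=
  a.1 < b.1 || (a.1 == b.1 && (a.2.1 < b.2.1 || (a.2.1 == b.2.1 && decide (a.2.2 < b.2.2))))

-- heappop's contract: remove one lexicographically least tuple.
def pvPopMin : List (Int × Int × Nat) → Option ((Int × Int × Nat) × List (Int × Int × Nat))
  | [] => none
  | x :: xs =>
    match pvPopMin xs with
    | none => some (x, [])
    | some (m, rest) => if pvTLt m x then some (m, x :: rest) else some (x, xs)

-- the 'for _ in range(k)' loop; 'none' at a failing pop is Python's IndexError (outside Pre_).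
def pvHeapLoop (S : List (List Int)) : Nat → List (Int × Int × Nat) → Option Int → Option Int
  | 0, _, res => res
  | n+1, heap, _ =>
    match pvPopMin heap with
    | none => none
    | some ((num, ai, ii), rest) =>
      let row := PySem.List.pyGetD S ai []
      let heap' := if ii + 1 < row.length then rest ++ [(-(row.getD (ii+1) 0), ai, ii+1)] else rest
      pvHeapLoop S n heap' (some (-num))

def KthInArrays (arrays : List (List Int)) (k : Int) : Option Int :=
  if arrays = [] ∨ k ≤ 0 then none
  else
    let S := arrays.foldl (fun acc arr => if arr = [] then acc else acc ++ [PySem.List.sorted arr (fun x => x) true]) []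
    -- array[0] on the (by construction nonempty) rows is headI
    let heap := (PySem.List.enumerate S 0).map (fun p => (-(p.2.headI), p.1, (0 : Nat)))
    pvHeapLoop S k.toNat heap none

-- ===== PORT B =====
def KthInArrays_alt (arrays : List (List Int)) (k : Int) : Option Int :=
  if arrays = [] ∨ k ≤ 0 then none
  else
    let flat := arrays.foldl (fun acc arr => acc ++ arr) []
    PySem.List.pyGet? (PySem.List.sorted flat (fun x => x) true) (k - 1)

-- ===== PRECONDITION & SPEC =====
-- Pre_ excludes only the inputs where A raises IndexError (heappop from an exhausted
-- heap): arrays nonempty, k positive, but k larger than the total number of elements.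
def Pre_KthInArrays (arrays : List (List Int)) (k : Int) : Prop :=
  arrays = [] ∨ k ≤ 0 ∨ k ≤ (arrays.flatten.length : Int)
instance (arrays : List (List Int)) (k : Int) : Decidable (Pre_KthInArrays arrays k) := by unfold Pre_KthInArrays; infer_instance
def pvWitness_KthInArrays : List (List Int) × Int := ([[1, 2], [3]], 2)

def Spec_KthInArrays (arrays : List (List Int)) (k : Int) (out : Option Int) : Prop := out = KthInArrays_alt arrays k
instance (arrays : List (List Int)) (k : Int) (out : Option Int) : Decidable (Spec_KthInArrays arrays k out) := by unfold Spec_KthInArrays; infer_instance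

-- ===== CLAIM (what is proved, stated in full; the proofs are below) =====
def Claim_equal_KthInArrays : Prop := ∀ (arrays : List (List Int)) (k : Int), Dom_KthInArrays arrays k → Pre_KthInArrays arrays k → Spec_KthInArrays arrays k (KthInArrays arrays k)

-- ===== LEMMAS AND PROOFS =====

lemma pvTLt_true_le {a b : Int × Int × Nat} (h : pvTLt a b = true) : a.1 ≤ b.1 := by
  simp [pvTLt] at h; omega

lemma pvTLt_false_le {a b : Int × Int × Nat} (h : pvTLt a b = false) : b.1 ≤ a.1 := by
  simp [pvTLt] at h; omega

-- pvPopMin removes one tuple of least first component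
lemma pvPopMin_spec {l : List (Int × Int × Nat)} (h : l ≠ []) :
    ∃ m rest, pvPopMin l = some (m, rest) ∧ l.Perm (m :: rest) ∧ ∀ y ∈ l, m.1 ≤ y.1 := by
  induction l with
  | nil => exact absurd rfl h
  | cons x xs ih =>
    by_cases hxs : xs = []
    · subst hxs
      exact ⟨x, [], by simp [pvPopMin], List.Perm.refl _, by simp⟩
    · obtain ⟨m, rest, hpop, hperm, hmin⟩ := ih hxs
      by_cases hlt : pvTLt m x = true
      · refine ⟨m, x :: rest, by simp [pvPopMin, hpop, hlt], ?_, ?_⟩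
        · exact (hperm.cons x).trans (List.Perm.swap m x rest)
        · intro y hy
          rcases List.mem_cons.1 hy with rfl | hy
          · exact pvTLt_true_le hlt
          · exact hmin y hy
      · refine ⟨x, xs, by simp [pvPopMin, hpop, hlt], List.Perm.refl _, ?_⟩
        intro y hy
        rcases List.mem_cons.1 hy with rfl | hy
        · exact le_refl _
        · exact le_trans (pvTLt_false_le (by simpa using hlt)) (hmin y hy)

-- the suffixes of the sorted rows still unseen by the heap
def pvRem (S : List (List Int)) (h : List (Int × Int × Nat)) : List Int :=
  (h.map (fun e => (S.getD e.2.1.toNat []).drop e.2.2)).flatten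

lemma pvRem_perm (S : List (List Int)) {h h' : List (Int × Int × Nat)} (p : h.Perm h') :
    (pvRem S h).Perm (pvRem S h') :=
  List.Perm.flatten (p.map _)

-- well-formed heap entries
def pvWF (S : List (List Int)) (h : List (Int × Int × Nat)) : Prop :=
  ∀ e ∈ h, ∃ a : Nat, e.2.1 = (a : Int) ∧ a < S.length ∧ e.2.2 < (S.getD a []).length ∧
    e.1 = -((S.getD a []).getD e.2.2 0)

-- a descending list dominates all its members from the front
lemma pvDesc_head_ge {l : List Int} (hl : l.Pairwise (fun a b => b ≤ a)) (n : Nat)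
    (hn : n < l.length) : ∀ w ∈ l.drop n, w ≤ l.getD n 0 := by
  have hd := hl.drop (i := n)
  rw [List.drop_eq_getElem_cons hn] at hd
  rw [List.getD_eq_getElem l 0 hn]
  intro w hw
  rw [List.drop_eq_getElem_cons hn] at hw
  rcases List.mem_cons.1 hw with rfl | hw
  · exact le_refl _
  · exact (List.pairwise_cons.1 hd).1 w hw

-- main loop invariant
lemma pvLoop_inv (S : List (List Int)) (D : List Int)
    (hS : ∀ r ∈ S, r.Pairwise (fun a b => b ≤ a)) (hD : D.Pairwise (fun a b => b ≤ a)) :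
    ∀ (n t : Nat) (heap : List (Int × Int × Nat)) (res : Option Int),
      pvWF S heap → (pvRem S heap).Perm (D.drop t) → t + n ≤ D.length →
      pvHeapLoop S n heap res = if n = 0 then res else some (D.getD (t + n - 1) 0) := by
  intro n
  induction n with
  | zero => intro t heap res _ _ _; rfl
  | succ n ih =>
    intro t heap res hWF hperm hlen
    have htD : t < D.length := by omega
    have hne : heap ≠ [] := by
      intro h0
      subst h0
      have h1 : D.drop t = [] := (List.Perm.symm hperm).eq_nil
      have h2 : D.length ≤ t := List.drop_eq_nil_iff.1 h1
      omega
    obtain ⟨m, rest, hpop, hpm, hmin⟩ := pvPopMin_spec hne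
    obtain ⟨num, ai, ii⟩ := m
    obtain ⟨a, hai, haS, hii, hval⟩ := hWF _ (hpm.symm.subset (List.mem_cons_self))
    simp only at hai haS hii hval
    have hrow0 : PySem.List.pyGetD S ai [] = S.getD a [] := by
      rw [hai]; exact PySem.List.pyGetD_natCast S a []
    have hv : -num = (S.getD a []).getD ii 0 := by rw [hval]; ring
    have hdropRow : (S.getD a []).drop ii = (S.getD a []).getD ii 0 :: (S.getD a []).drop (ii + 1) := by
      rw [List.drop_eq_getElem_cons hii, List.getD_eq_getElem _ 0 hii]
    have hR1 : (pvRem S heap).Perm ((S.getD a []).drop ii ++ pvRem S rest) := by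
      have hh := pvRem_perm S hpm
      simpa [pvRem, hai] using hh
    have hmax : ∀ w ∈ pvRem S heap, w ≤ -num := by
      intro w hw
      simp only [pvRem, List.mem_flatten, List.mem_map] at hw
      obtain ⟨_, ⟨e, he, rfl⟩, hw⟩ := hw
      obtain ⟨a', ha', ha'S, hii', hval'⟩ := hWF e he
      rw [ha', Int.toNat_natCast] at hw
      have hrow'mem : S.getD a' [] ∈ S := by
        rw [List.getD_eq_getElem S [] ha'S]; exact List.getElem_mem _
      have h1 : w ≤ (S.getD a' []).getD e.2.2 0 := pvDesc_head_ge (hS _ hrow'mem) e.2.2 hii' w hw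
      have h2 : num ≤ e.1 := hmin e he
      have h3 : e.1 = -((S.getD a' []).getD e.2.2 0) := hval'
      linarith
    have hvt : -num = D.getD t 0 := by
      have hvmem : -num ∈ pvRem S heap := by
        apply hR1.symm.subset
        apply List.mem_append_left
        rw [hdropRow, ← hv]
        exact List.mem_cons_self
      have h1 : -num ≤ D.getD t 0 := pvDesc_head_ge hD t htD _ (hperm.subset hvmem)
      have h2 : D.getD t 0 ≤ -num := by
        apply hmax
        apply hperm.symm.subset
        rw [List.drop_eq_getElem_cons htD, ← List.getD_eq_getElem D 0 htD]
        exact List.mem_cons_self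
      omega
    have hDt : D.drop t = D.getD t 0 :: D.drop (t + 1) := by
      rw [List.drop_eq_getElem_cons htD, List.getD_eq_getElem D 0 htD]
    have hrest : ∀ e ∈ rest, e ∈ heap := fun e he =>
      hpm.symm.subset (List.mem_cons_of_mem _ he)
    have finish : ∀ h2 : List (Int × Int × Nat), pvWF S h2 →
        (pvRem S h2).Perm ((S.getD a []).drop (ii + 1) ++ pvRem S rest) →
        pvHeapLoop S n h2 (some (-num)) = if n + 1 = 0 then res else some (D.getD (t + (n + 1) - 1) 0) := by
      intro h2 wf2 pm2
      have pm3 : (pvRem S h2).Perm (D.drop (t + 1)) := by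
        have p1 : ((-num) :: pvRem S h2).Perm ((S.getD a []).drop ii ++ pvRem S rest) := by
          rw [hdropRow, ← hv]
          exact pm2.cons _
        have p2 : ((-num) :: pvRem S h2).Perm (D.drop t) := p1.trans (hR1.symm.trans hperm)
        rw [hDt, ← hvt] at p2
        exact p2.cons_inv
      rw [ih (t + 1) h2 (some (-num)) wf2 pm3 (by omega)]
      by_cases hn : n = 0
      · subst hn; simp [hvt]
      · simp only [hn, if_false, if_neg (Nat.succ_ne_zero n)]
        congr 2
        omega
    simp only [pvHeapLoop, hpop, hrow0]
    by_cases hpush : ii + 1 < (S.getD a []).length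
    · simp only [if_pos hpush]
      apply finish
      · intro e he
        rcases List.mem_append.1 he with he | he
        · exact hWF e (hrest e he)
        · rw [List.mem_singleton] at he
          subst he
          exact ⟨a, hai, haS, hpush, rfl⟩
      · have : pvRem S (rest ++ [(-(S.getD a []).getD (ii + 1) 0, ai, ii + 1)]) =
            pvRem S rest ++ (S.getD a []).drop (ii + 1) := by
          simp [pvRem, hai]
        rw [this]
        exact List.perm_append_comm
    · simp only [if_neg hpush]
      apply finish
      · intro e he; exact hWF e (hrest e he)
      · have : (S.getD a []).drop (ii + 1) = [] := by
          rw [List.drop_eq_nil_iff]; omega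
        rw [this]
        simp

lemma pvFoldS (arrays : List (List Int)) (acc : List (List Int)) :
    arrays.foldl (fun acc arr => if arr = [] then acc else acc ++ [PySem.List.sorted arr (fun x => x) true]) acc
      = acc ++ (arrays.filter (fun a => !a.isEmpty)).map (fun a => PySem.List.sorted a (fun x => x) true) := by
  induction arrays generalizing acc with
  | nil => simp
  | cons x t ih =>
    by_cases hx : x = []
    · subst hx
      simpa using ih acc
    · have hx' : x.isEmpty = false := by
        simpa [List.isEmpty_iff] using hx
      simp [List.foldl_cons, hx, ih, hx', List.append_assoc]

lemma pvFoldFlat (arrays : List (List Int)) (acc : List Int) :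
    arrays.foldl (fun acc arr => acc ++ arr) acc = acc ++ arrays.flatten := by
  induction arrays generalizing acc with
  | nil => simp
  | cons x t ih => simp [List.foldl_cons, ih, List.append_assoc]

lemma pvFlattenS_perm (arrays : List (List Int)) :
    ((arrays.filter (fun a => !a.isEmpty)).map (fun a => PySem.List.sorted a (fun x => x) true)).flatten.Perm
      arrays.flatten := by
  induction arrays with
  | nil => simp
  | cons x t ih =>
    by_cases hx : x = []
    · subst hx
      simpa using ih
    · have hx' : x.isEmpty = false := by
        simpa [List.isEmpty_iff] using hx
      simp only [List.filter_cons, hx', List.flatten_cons]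
      exact (PySem.List.sorted_perm x (fun x => x) true).append ih

-- ===== VERDICT (by name: the statement is the Claim_ definition above) =====
theorem KthInArrays_spec : Claim_equal_KthInArrays := by
  intro arrays k _ hPre
  unfold Spec_KthInArrays KthInArrays KthInArrays_alt
  by_cases h0 : arrays = [] ∨ k ≤ 0
  · simp only [if_pos h0]
  · simp only [if_neg h0]
    obtain ⟨hA, hk'⟩ := not_or.1 h0
    have hk : 0 < k := by omega
    have hklen : k ≤ (arrays.flatten.length : Int) := by
      rcases hPre with h | h | h
      · exact absurd h hA
      · omega
      · exact h
    rw [pvFoldS arrays [], pvFoldFlat arrays []]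
    simp only [List.nil_append]
    set S := (arrays.filter (fun a => !a.isEmpty)).map (fun a => PySem.List.sorted a (fun x => x) true) with hSdef
    set D := PySem.List.sorted arrays.flatten (fun x => x) true with hDdef
    have hrows : ∀ r ∈ S, r.Pairwise (fun a b => b ≤ a) := by
      intro r hr
      rw [hSdef] at hr
      obtain ⟨x, _, rfl⟩ := List.mem_map.1 hr
      simpa using PySem.List.sorted_pairwise_rev x (fun x => x)
    have hrowsne : ∀ r ∈ S, r ≠ [] := by
      intro r hr
      rw [hSdef] at hr
      obtain ⟨x, hx, rfl⟩ := List.mem_map.1 hr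
      have hxne : x ≠ [] := by
        have := (List.mem_filter.1 hx).2
        simpa [List.isEmpty_iff] using this
      rw [Ne, PySem.List.sorted_eq_nil_iff]
      exact hxne
    have hD : D.Pairwise (fun a b => b ≤ a) := by
      simpa using PySem.List.sorted_pairwise_rev arrays.flatten (fun x => x)
    have hDlen : D.length = arrays.flatten.length := PySem.List.length_sorted arrays.flatten _ _
    set heap₀ := (PySem.List.enumerate S 0).map (fun p => (-(p.2.headI), p.1, (0 : Nat))) with hheap₀
    have hWF0 : pvWF S heap₀ := by
      intro e he
      rw [hheap₀] at he
      obtain ⟨p, hp, rfl⟩ := List.mem_map.1 he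
      rw [PySem.List.mem_enumerate_iff] at hp
      obtain ⟨j, hj, rfl⟩ := hp
      have hrow : S.getD j [] = S[j] := List.getD_eq_getElem S [] hj
      have hne : S[j] ≠ [] := hrowsne _ (List.getElem_mem hj)
      obtain ⟨b, bs, hcons⟩ := List.exists_cons_of_ne_nil hne
      refine ⟨j, by simp, hj, ?_, ?_⟩
      · rw [hrow, hcons]; simp
      · rw [hrow, hcons]; simp
    have hmapS : heap₀.map (fun e => (S.getD e.2.1.toNat []).drop e.2.2) = S := by
      rw [hheap₀, List.map_map]
      apply List.ext_getElem
      · simp [PySem.List.length_enumerate]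
      · intro j h1 h2
        have hj : j < S.length := by
          simpa [PySem.List.length_enumerate] using h1
        simp [PySem.List.getElem_enumerate, List.getElem?_eq_getElem hj]
    have hrem0 : pvRem S heap₀ = S.flatten := by
      unfold pvRem
      rw [hmapS]
    have hperm0 : (pvRem S heap₀).Perm (D.drop 0) := by
      rw [hrem0, List.drop_zero, hSdef, hDdef]
      exact (pvFlattenS_perm arrays).trans (PySem.List.sorted_perm arrays.flatten (fun x => x) true).symm
    have hkpos : 0 < k := by omega
    have hkN : k.toNat ≤ D.length := by
      rw [hDlen]; omega
    rw [pvLoop_inv S D hrows hD k.toNat 0 heap₀ none hWF0 hperm0 (by omega)]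
    have hk0 : k.toNat ≠ 0 := by omega
    rw [if_neg hk0]
    have hidx : k - 1 = ((k.toNat - 1 : Nat) : Int) := by omega
    have hlt : k.toNat - 1 < D.length := by omega
    rw [show 0 + k.toNat - 1 = k.toNat - 1 from by omega]
    rw [hidx, PySem.List.pyGet?_natCast, List.getElem?_eq_getElem hlt,
      List.getD_eq_getElem D 0 hlt]
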